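-- pv_equiv track=rewrite | github.com/tomdicarlo/MS_Proj | mem_tree.py | get_page_reuse_distances
-- ===== SOURCE A (Python) =====
-- def get_page_reuse_distances(pages):
--     page_accesses = {}
--     reuse_distances = {}
--     for page in pages:
--         if not page in page_accesses:
--             page_accesses[page] = []
--         else:
--             reuse_distance = len(page_accesses[page])
--             if not page in reuse_distances:
--                 reuse_distances[page] = []
--
--             reuse_distances[page].append(reuse_distance)
--             page_accesses[page] = []
--
--         for access_record in page_accesses:
--             if access_record != page and page not in page_accesses[access_record]:
--                 page_accesses[access_record].append(page)
--
--     return reuse_distances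
-- ===== SOURCE B (Python) =====
-- def get_page_reuse_distances(pages):
--     # one pass over the trace: reuse distance = number of distinct pages strictly
--     # between the previous access of p and the current one, computed from the trace
--     # slice itself instead of maintaining per-page "seen since last access" lists.
--     res = {}
--     last = {}
--     for i, p in enumerate(pages):
--         if p in last:
--             d = len(set(pages[last[p] + 1 : i]))
--             if p in res:
--                 res[p].append(d)
--             else:
--                 res[p] = [d]
--         last[p] = i
--     return res
-- ===== Notes on version B (the rewrite author's own statement) =====
-- stated objective: faster
-- what changed: A maintains, for every tracked page, a growing list of distinct pages seen since its last access and rescans all of those lists on every access; B makes one pass keeping only each page's last position and computes each reuse distance directly as len(set()) of the trace slice since the previous access.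
import Mathlib
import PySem

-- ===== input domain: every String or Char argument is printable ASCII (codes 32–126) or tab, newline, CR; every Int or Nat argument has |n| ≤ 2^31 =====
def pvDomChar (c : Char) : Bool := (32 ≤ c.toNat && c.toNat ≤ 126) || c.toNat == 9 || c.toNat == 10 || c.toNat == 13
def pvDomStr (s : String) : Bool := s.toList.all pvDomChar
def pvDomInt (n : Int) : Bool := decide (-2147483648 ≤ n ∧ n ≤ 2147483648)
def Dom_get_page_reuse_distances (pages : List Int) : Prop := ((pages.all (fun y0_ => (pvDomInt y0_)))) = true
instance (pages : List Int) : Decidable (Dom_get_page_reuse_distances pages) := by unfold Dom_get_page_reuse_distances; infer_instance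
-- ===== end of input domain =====

-- B replaces A's per-access rescan of every tracked page's "seen since last access" list by a single
-- pass that recomputes each reuse distance as len(set(trace slice since the previous access)),
-- tracked with a last-position dict (objective: faster).

-- ===== PORT A =====
-- the body of A's 'for page in pages' loop
def pvAStep (st : PySem.Dict Int (List Int) × PySem.Dict Int (List Int)) (page : Int) :
    PySem.Dict Int (List Int) × PySem.Dict Int (List Int) :=
  let pa := st.1
  let rd := st.2
  let par :=
    if pa.contains page = false then
      (pa.insert page ([] : List Int), rd)
    else
      let reuse : Int := ((pa.getD page []).length : Int)
      let rd := if rd.contains page = false then rd.insert page ([] : List Int) else rd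
      let rd := rd.modify page [] (fun v => v ++ [reuse])
      (pa.insert page ([] : List Int), rd)
  -- 'for access_record in page_accesses: …' mutates only values, so it is the
  -- order-preserving map over the dict's items (exact: keys are unchanged by the loop)
  (PySem.Dict.mk (par.1.items.map (fun qv =>
      if qv.1 ≠ page ∧ qv.2.contains page = false then (qv.1, qv.2 ++ [page]) else qv)),
   par.2)

def get_page_reuse_distances (pages : List Int) : List (Int × List Int) :=
  (pages.foldl pvAStep (PySem.Dict.empty, PySem.Dict.empty)).2.items

-- ===== PORT B =====
-- the body of B's 'for i, p in enumerate(pages)' loop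
def pvAltStep (pages : List Int)
    (st : PySem.Dict Int (List Int) × PySem.Dict Int Int) (ip : Int × Int) :
    PySem.Dict Int (List Int) × PySem.Dict Int Int :=
  let res := st.1
  let last := st.2
  let res :=
    match last.get? ip.2 with
    | some j =>
        let d : Int := ((PySem.Set.ofList (PySem.List.slice pages (some (j + 1)) (some ip.1))).length : Int)
        if res.contains ip.2 then res.modify ip.2 [] (fun v => v ++ [d])
        else res.insert ip.2 [d]
    | none => res
  (res, last.insert ip.2 ip.1)

def get_page_reuse_distances_alt (pages : List Int) : List (Int × List Int) :=
  ((PySem.List.enumerate pages).foldl (pvAltStep pages)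
      (PySem.Dict.empty, PySem.Dict.empty)).1.items

-- ===== PRECONDITION & SPEC =====
def Spec_get_page_reuse_distances (pages : List Int) (out : List (Int × List Int)) : Prop := out = get_page_reuse_distances_alt pages
instance (pages : List Int) (out : List (Int × List Int)) : Decidable (Spec_get_page_reuse_distances pages out) := by unfold Spec_get_page_reuse_distances; infer_instance

-- ===== CLAIM (what is proved, stated in full; the proofs are below) =====
def Claim_equal_get_page_reuse_distances : Prop := ∀ (pages : List Int), Dom_get_page_reuse_distances pages → Spec_get_page_reuse_distances pages (get_page_reuse_distances pages)

-- ===== LEMMAS AND PROOFS =====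

-- the part of xs strictly after the last occurrence of q (all of xs if q ∉ xs)
def pvSuff (q : Int) (xs : List Int) : List Int :=
  (xs.reverse.takeWhile (fun a => a != q)).reverse

-- closed form of A's page_accesses dict after processing xs
def pvPaSpec (xs : List Int) : PySem.Dict Int (List Int) :=
  PySem.Dict.mk ((PySem.List.dedup xs).map (fun q => (q, PySem.List.dedup (pvSuff q xs))))

-- closed form of B's last dict after processing xs
def pvLastSpec (xs : List Int) : PySem.Dict Int Int :=
  PySem.Dict.mk ((PySem.List.dedup xs).map
    (fun q => (q, (xs.length : Int) - ((pvSuff q xs).length : Int) - 1)))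

lemma pvGet_mk_map {α : Type} (f : Int → α) (l : List Int) (p : Int) :
    (PySem.Dict.mk (l.map (fun q => (q, f q)))).get? p =
      if p ∈ l then some (f p) else none := by
  induction l with
  | nil => simp [PySem.Dict.get?]
  | cons x t ih =>
      simp only [List.map_cons, PySem.Dict.get?_mk_cons, ih]
      by_cases h : x = p
      · simp [h]
      · simp [h, Ne.symm h, List.mem_cons]

lemma pvPa_get? (xs : List Int) (p : Int) :
    (pvPaSpec xs).get? p = if p ∈ xs then some (PySem.List.dedup (pvSuff p xs)) else none := by
  unfold pvPaSpec; rw [pvGet_mk_map]; simp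

lemma pvPa_contains (xs : List Int) (p : Int) :
    (pvPaSpec xs).contains p = decide (p ∈ xs) := by
  rw [PySem.Dict.contains_eq_isSome_get?, pvPa_get?]
  by_cases h : p ∈ xs <;> simp [h]

lemma pvLast_get? (xs : List Int) (p : Int) :
    (pvLastSpec xs).get? p =
      if p ∈ xs then some ((xs.length : Int) - ((pvSuff p xs).length : Int) - 1) else none := by
  unfold pvLastSpec; rw [pvGet_mk_map]; simp

lemma pvLast_contains (xs : List Int) (p : Int) :
    (pvLastSpec xs).contains p = decide (p ∈ xs) := by
  rw [PySem.Dict.contains_eq_isSome_get?, pvLast_get?]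
  by_cases h : p ∈ xs <;> simp [h]

-- A's and B's updates of the result dict are the same dict operation
lemma pvRd_eq (r : PySem.Dict Int (List Int)) (p d : Int) :
    ((if r.contains p = false then r.insert p ([] : List Int) else r).modify p [] (fun v => v ++ [d])) =
      (if r.contains p then r.modify p [] (fun v => v ++ [d]) else r.insert p [d]) := by
  by_cases h : r.contains p
  · simp [h]
  · simp [h, PySem.Dict.modify, PySem.Dict.getD_insert_self, PySem.Dict.insert_insert_self]

lemma pvSuff_append (q p : Int) (xs : List Int) :
    pvSuff q (xs ++ [p]) = if p = q then [] else pvSuff q xs ++ [p] := by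
  unfold pvSuff
  rw [List.reverse_append]
  by_cases h : p = q
  · simp [h]
  · have hb : (p != q) = true := by simp [h]
    simp [hb, h]

lemma pvMem_suff {a q : Int} {xs : List Int} (h : a ∈ pvSuff q xs) : a ∈ xs := by
  unfold pvSuff at h
  rw [List.mem_reverse] at h
  have := (List.takeWhile_prefix _).subset h
  simpa using this

lemma pvDedup_append (xs : List Int) (p : Int) :
    PySem.List.dedup (xs ++ [p]) =
      if p ∈ xs then PySem.List.dedup xs else PySem.List.dedup xs ++ [p] := by
  simp only [PySem.List.dedup_eq_ofList, PySem.Set.ofList_eq_foldl, List.foldl_append,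
    List.foldl_cons, List.foldl_nil]
  rw [← PySem.Set.ofList_eq_foldl]
  simp [PySem.Set.add]

-- inserting the new last position turns pvLastSpec xs into pvLastSpec (xs ++ [p])
lemma pvLast_step (xs : List Int) (p : Int) :
    (pvLastSpec xs).insert p (xs.length : Int) = pvLastSpec (xs ++ [p]) := by
  apply PySem.Dict.ext
  by_cases hp : p ∈ xs
  · rw [PySem.Dict.items_insert_of_contains _ _ (by rw [pvLast_contains]; simpa)]
    show ((PySem.List.dedup xs).map _).map _ = _
    unfold pvLastSpec
    rw [pvDedup_append, if_pos hp, List.map_map]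
    apply List.map_congr_left
    intro q hq
    by_cases hqp : q = p
    · subst hqp
      simp [pvSuff_append, List.length_append]
    · have hk : pvSuff q (xs ++ [p]) = pvSuff q xs ++ [p] := by
        rw [pvSuff_append, if_neg (fun h => hqp h.symm)]
      simp only [Function.comp_apply, beq_iff_eq, hqp, if_false, hk, List.length_append]
      push_cast; ring_nf
  · rw [PySem.Dict.items_insert_of_not_contains _ _ (by rw [pvLast_contains]; simpa)]
    show (PySem.List.dedup xs).map _ ++ _ = _
    unfold pvLastSpec
    rw [pvDedup_append, if_neg hp, List.map_append]
    congr 1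
    · apply List.map_congr_left
      intro q hq
      have hqp : ¬ p = q := by
        intro h; subst h; exact hp (by simpa using hq)
      rw [pvSuff_append, if_neg hqp]
      simp only [List.length_append]
      congr 1; push_cast; ring
    · simp [pvSuff_append]

-- A's inner loop over page_accesses turns pvPaSpec xs into pvPaSpec (xs ++ [p])
lemma pvPa_step (xs : List Int) (p : Int) :
    PySem.Dict.mk ((((pvPaSpec xs).insert p ([] : List Int)).items).map
      (fun qv => if qv.1 ≠ p ∧ qv.2.contains p = false then (qv.1, qv.2 ++ [p]) else qv))
      = pvPaSpec (xs ++ [p]) := by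
  apply PySem.Dict.ext
  by_cases hp : p ∈ xs
  · rw [PySem.Dict.items_insert_of_contains _ _ (by rw [pvPa_contains]; simpa)]
    show ((((PySem.List.dedup xs).map _).map _).map _) = (pvPaSpec (xs ++ [p])).items
    unfold pvPaSpec
    rw [pvDedup_append, if_pos hp, List.map_map, List.map_map]
    apply List.map_congr_left
    intro q hq
    by_cases hqp : q = p
    · subst hqp; simp [pvSuff_append]
    · have hk : pvSuff q (xs ++ [p]) = pvSuff q xs ++ [p] := by
        rw [pvSuff_append, if_neg (fun h => hqp h.symm)]
      simp only [Function.comp_apply, beq_iff_eq, hqp, if_false, ne_eq, not_false_iff, true_and, hk]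
      rw [pvDedup_append]
      by_cases hmem : p ∈ pvSuff q xs
      · simp [hmem]
      · simp [hmem]
  · rw [PySem.Dict.items_insert_of_not_contains _ _ (by rw [pvPa_contains]; simpa)]
    show (((PySem.List.dedup xs).map _) ++ _).map _ = (pvPaSpec (xs ++ [p])).items
    unfold pvPaSpec
    rw [pvDedup_append, if_neg hp, List.map_append, List.map_append, List.map_map]
    congr 1
    · apply List.map_congr_left
      intro q hq
      have hqp : ¬ p = q := by
        intro h; subst h; exact hp (by simpa using hq)
      have hk : pvSuff q (xs ++ [p]) = pvSuff q xs ++ [p] := by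
        rw [pvSuff_append, if_neg hqp]
      have hmem : ¬ p ∈ pvSuff q xs := fun h => hp (pvMem_suff h)
      simp only [Function.comp_apply, ne_eq, hk]
      have hqp' : ¬ q = p := fun h => hqp h.symm
      rw [pvDedup_append, if_neg hmem]
      simp [hqp', hmem]
    · simp [pvSuff_append]

lemma pvTakeWhile_lt {q : Int} {l : List Int} (h : q ∈ l) :
    (l.takeWhile (fun a => a != q)).length < l.length := by
  induction l with
  | nil => simp at h
  | cons x t ih =>
      by_cases hx : x = q
      · simp [hx]
      · have hb : (x != q) = true := by simp [hx]
        rcases List.mem_cons.mp h with h1 | h2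
        · exact absurd h1.symm hx
        · have := ih h2
          simp [hb]
          omega

lemma pvSuff_length_lt {q : Int} {xs : List Int} (h : q ∈ xs) :
    (pvSuff q xs).length < xs.length := by
  unfold pvSuff
  rw [List.length_reverse]
  have := pvTakeWhile_lt (List.mem_reverse.mpr h)
  simpa using this

lemma pvDrop_suff (q : Int) (xs : List Int) :
    xs.drop (xs.length - (pvSuff q xs).length) = pvSuff q xs := by
  have htake := List.prefix_iff_eq_take.mp
    (List.takeWhile_prefix (l := xs.reverse) (p := fun a => a != q))
  unfold pvSuff
  conv_rhs => rw [htake]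
  rw [List.reverse_take]
  simp

-- the slice B takes from the full trace IS the segment since the previous access
lemma pvSlice_suff (t rest : List Int) (p : Int) (hp : p ∈ t) :
    PySem.List.slice (t ++ rest)
      (some ((t.length : Int) - ((pvSuff p t).length : Int) - 1 + 1))
      (some (t.length : Int)) = pvSuff p t := by
  have hk := pvSuff_length_lt hp
  have h1 : ((t.length : Int) - ((pvSuff p t).length : Int) - 1 + 1)
      = ((t.length - (pvSuff p t).length : Nat) : Int) := by omega
  rw [h1, PySem.List.slice_natCast]
  rw [List.drop_append_of_le_length (by omega)]
  rw [List.take_left' (by rw [List.length_drop])]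
  exact pvDrop_suff p t

lemma pvEnumerate_append (xs : List Int) (p : Int) (s : Int) :
    PySem.List.enumerate (xs ++ [p]) s = PySem.List.enumerate xs s ++ [(s + xs.length, p)] := by
  induction xs generalizing s with
  | nil => simp [PySem.List.enumerate_nil, PySem.List.enumerate_cons]
  | cons x t ih =>
      simp [PySem.List.enumerate_cons, ih]
      ring

-- the loop invariant: after any processed prefix xs of the trace ys, A's page_accesses is
-- pvPaSpec xs, B's last dict is pvLastSpec xs, and the two result dicts coincide
lemma pvInv (xs ys : List Int) (h : xs <+: ys) :
    (xs.foldl pvAStep (PySem.Dict.empty, PySem.Dict.empty)).1 = pvPaSpec xs ∧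
    ((PySem.List.enumerate xs).foldl (pvAltStep ys) (PySem.Dict.empty, PySem.Dict.empty)).2 = pvLastSpec xs ∧
    (xs.foldl pvAStep (PySem.Dict.empty, PySem.Dict.empty)).2 =
      ((PySem.List.enumerate xs).foldl (pvAltStep ys) (PySem.Dict.empty, PySem.Dict.empty)).1 := by
  induction xs using List.reverseRecOn with
  | nil =>
      refine ⟨?_, ?_, rfl⟩ <;> apply PySem.Dict.ext <;>
        simp [pvPaSpec, pvLastSpec, PySem.Dict.empty, PySem.List.enumerate_nil]
  | append_singleton t p ih =>
      obtain ⟨hA, hL, hR⟩ := ih ((t.prefix_append [p]).trans h)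
      rw [List.foldl_append, List.foldl_cons, List.foldl_nil]
      rw [pvEnumerate_append, List.foldl_append, List.foldl_cons, List.foldl_nil]
      set SA := t.foldl pvAStep (PySem.Dict.empty, PySem.Dict.empty) with hSA
      set SB := (PySem.List.enumerate t).foldl (pvAltStep ys) (PySem.Dict.empty, PySem.Dict.empty) with hSB
      obtain ⟨r, hys⟩ := h
      by_cases hp : p ∈ t
      · have hcA : SA.1.contains p = true := by rw [hA, pvPa_contains]; simpa
        have hgB : SB.2.get? p =
            some ((t.length : Int) - ((pvSuff p t).length : Int) - 1) := by
          rw [hL, pvLast_get?, if_pos hp]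
        have hgetD : SA.1.getD p [] = PySem.List.dedup (pvSuff p t) := by
          rw [hA, PySem.Dict.getD_eq_get?_getD, pvPa_get?, if_pos hp]; rfl
        have hslice : PySem.List.slice ys
            (some ((t.length : Int) - ((pvSuff p t).length : Int) - 1 + 1))
            (some (0 + (t.length : Int))) = pvSuff p t := by
          rw [zero_add, ← hys, List.append_assoc]
          exact pvSlice_suff t ([p] ++ r) p hp
        simp only [pvAStep, pvAltStep, hcA, hgB, hgetD, Bool.true_eq_false, if_false]
        simp only [hslice]
        refine ⟨?_, ?_, ?_⟩
        · rw [hA]; exact pvPa_step t p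
        · rw [hL, zero_add]; exact pvLast_step t p
        · rw [hR]
          rw [PySem.List.dedup_eq_ofList]
          exact (pvRd_eq SB.1 p _).symm ▸ rfl
      · have hcA : SA.1.contains p = false := by rw [hA, pvPa_contains]; simpa
        have hgB : SB.2.get? p = none := by rw [hL, pvLast_get?, if_neg hp]
        simp only [pvAStep, pvAltStep, hcA, hgB, if_true]
        refine ⟨?_, ?_, hR⟩
        · rw [hA]; exact pvPa_step t p
        · rw [hL, zero_add]; exact pvLast_step t p

-- ===== VERDICT (by name: the statement is the Claim_ definition above) =====
theorem get_page_reuse_distances_spec : Claim_equal_get_page_reuse_distances := by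
  intro pages _
  unfold Spec_get_page_reuse_distances get_page_reuse_distances get_page_reuse_distances_alt
  obtain ⟨-, -, hR⟩ := pvInv pages pages (List.prefix_refl pages)
  rw [hR]
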